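-- pv_equiv track=rewrite | github.com/perklis/aois | Calculator.py | _add_bits_n
-- ===== SOURCE A (Python) =====
-- def _add_bits_n(a: str, b: str) -> str:
--     """Сложение двух строк одинаковой длины N, возвращает сумму N бит (перенос отбрасывается)."""
--     if len(a) != len(b):
--         raise ValueError("Для _add_bits_n длины должны совпадать")
--
--     carry = 0
--     out = ["0"] * len(a)
--
--     for i in range(len(a) - 1, -1, -1):
--         a_bit = 1 if a[i] == "1" else 0
--         b_bit = 1 if b[i] == "1" else 0
--
--         s = a_bit + b_bit + carry
--         out[i] = "1" if (s % 2) == 1 else "0"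
--         carry = 1 if s >= 2 else 0
--
--     return "".join(out)
-- ===== SOURCE B (Python) =====
-- def _add_bits_n(a: str, b: str) -> str:
--     """Value-based re-implementation: interpret both strings as numbers
--     (left-to-right fold, any non-'1' char counts as 0), add arithmetically,
--     then peel off the low len(a) bits and emit them most-significant first."""
--     if len(a) != len(b):
--         raise ValueError("Для _add_bits_n длины должны совпадать")
--     va = 0
--     for c in a:
--         va = va * 2 + (1 if c == '1' else 0)
--     vb = 0
--     for c in b:
--         vb = vb * 2 + (1 if c == '1' else 0)
--     total = va + vb
--     bits = []
--     for _ in range(len(a)):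
--         bits.append('1' if total % 2 == 1 else '0')
--         total //= 2
--     return ''.join(reversed(bits))
-- ===== Notes on version B (the rewrite author's own statement) =====
-- stated objective: alternative
-- what changed: Replaced the single right-to-left carry-propagating scan that mutates an output array with a value-based computation: fold each string to its numeric value, add arithmetically, then read off the low N bits most-significant first.
import Mathlib
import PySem

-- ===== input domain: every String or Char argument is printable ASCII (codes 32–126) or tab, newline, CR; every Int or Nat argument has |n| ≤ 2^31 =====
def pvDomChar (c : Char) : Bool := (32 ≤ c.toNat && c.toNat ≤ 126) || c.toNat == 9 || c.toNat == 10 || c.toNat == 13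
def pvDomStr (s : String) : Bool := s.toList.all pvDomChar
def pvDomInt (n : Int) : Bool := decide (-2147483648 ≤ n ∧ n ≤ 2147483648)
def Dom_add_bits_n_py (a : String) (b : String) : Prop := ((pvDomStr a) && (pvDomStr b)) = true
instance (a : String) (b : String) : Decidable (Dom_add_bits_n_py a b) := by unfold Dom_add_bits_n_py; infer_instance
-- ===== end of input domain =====

-- B replaces A's carry-propagating right-to-left scan with a value-based computation
-- (fold each string to a number, add, extract the low N bits); objective: alternative algorithm, not faster.

-- ===== PORT A =====
-- Literal port of A: loop i = len-1 .. 0, carry and an output buffer updated by index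
-- assignment.  carry and s stay in {0,..,3} (Python ints), so Nat arithmetic is exact here.
def add_bits_n_py (a : String) (b : String) : String :=
  let al := a.toList
  let bl := b.toList
  if al.length ≠ bl.length then ""   -- A raises ValueError here; excluded by Pre_
  else
    let r := ((List.range al.length).reverse).foldl
      (fun (st : Nat × List Char) i =>
        let a_bit := if al.getD i ' ' = '1' then 1 else 0
        let b_bit := if bl.getD i ' ' = '1' then 1 else 0
        let s := a_bit + b_bit + st.1
        (if s ≥ 2 then 1 else 0, st.2.set i (if s % 2 = 1 then '1' else '0')))
      (0, List.replicate al.length '0')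
    String.mk r.2

-- ===== PORT B =====
-- Literal port of B: fold each string to its value, add, then peel off the low N bits
-- into a buffer and reverse it (all values are non-negative Python ints, so Nat is exact).
def add_bits_n_py_alt (a : String) (b : String) : String :=
  let al := a.toList
  let bl := b.toList
  if al.length ≠ bl.length then ""   -- B raises ValueError here; excluded by Pre_
  else
    let va := al.foldl (fun v c => v * 2 + if c = '1' then 1 else 0) 0
    let vb := bl.foldl (fun v c => v * 2 + if c = '1' then 1 else 0) 0
    let total := va + vb
    let r := (List.range al.length).foldl
      (fun (st : List Char × Nat) _ =>
        (st.1 ++ [if st.2 % 2 = 1 then '1' else '0'], st.2 / 2))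
      ([], total)
    String.mk r.1.reverse

-- ===== PRECONDITION & SPEC =====
-- Pre_ excludes only mismatched lengths, where both A and B raise ValueError.
def Pre_add_bits_n_py (a : String) (b : String) : Prop := a.toList.length = b.toList.length
instance (a : String) (b : String) : Decidable (Pre_add_bits_n_py a b) := by unfold Pre_add_bits_n_py; infer_instance
def pvWitness_add_bits_n_py : String × String := ("1011", "0111")

def Spec_add_bits_n_py (a : String) (b : String) (out : String) : Prop := out = add_bits_n_py_alt a b
instance (a : String) (b : String) (out : String) : Decidable (Spec_add_bits_n_py a b out) := by unfold Spec_add_bits_n_py; infer_instance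

-- ===== CLAIM (what is proved, stated in full; the proofs are below) =====
def Claim_equal_add_bits_n_py : Prop := ∀ (a : String) (b : String), Dom_add_bits_n_py a b → Pre_add_bits_n_py a b → Spec_add_bits_n_py a b (add_bits_n_py a b)

-- ===== LEMMAS AND PROOFS =====

-- A's loop body, named so the lemmas can speak about it.
def pvStep (al bl : List Char) : Nat × List Char → Nat → Nat × List Char :=
  fun st i =>
    let a_bit := if al.getD i ' ' = '1' then 1 else 0
    let b_bit := if bl.getD i ' ' = '1' then 1 else 0
    let s := a_bit + b_bit + st.1
    (if s ≥ 2 then 1 else 0, st.2.set i (if s % 2 = 1 then '1' else '0'))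

-- The sum bits produced by A's loop restricted to indices k-1 .. 0 with incoming carry c.
def pvOutK (al bl : List Char) : Nat → Nat → List Char
  | 0, _ => []
  | k + 1, c =>
    let s := (if al.getD k ' ' = '1' then 1 else 0) + (if bl.getD k ' ' = '1' then 1 else 0) + c
    pvOutK al bl k (if s ≥ 2 then 1 else 0) ++ [if s % 2 = 1 then '1' else '0']

-- The carry left by that restricted loop.
def pvCarryK (al bl : List Char) : Nat → Nat → Nat
  | 0, c => c
  | k + 1, c =>
    let s := (if al.getD k ' ' = '1' then 1 else 0) + (if bl.getD k ' ' = '1' then 1 else 0) + c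
    pvCarryK al bl k (if s ≥ 2 then 1 else 0)

-- B's value fold.
def pvVal (l : List Char) : Nat := l.foldl (fun v c => v * 2 + if c = '1' then 1 else 0) 0

theorem pvSet_replicate (k : Nat) (x : Char) (suffix : List Char) :
    (List.replicate (k + 1) '0' ++ suffix).set k x = List.replicate k '0' ++ x :: suffix := by
  induction k with
  | zero => simp
  | succ k ih =>
      have h : List.replicate (k + 2) '0' = '0' :: List.replicate (k + 1) '0' := rfl
      simp only [h, List.cons_append, List.set, ih]
      rw [List.replicate_succ]
      simp

theorem pvFoldA (al bl : List Char) :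
    ∀ (k : Nat) (c : Nat) (suffix : List Char),
      ((List.range k).reverse).foldl (pvStep al bl) (c, List.replicate k '0' ++ suffix)
        = (pvCarryK al bl k c, pvOutK al bl k c ++ suffix) := by
  intro k
  induction k with
  | zero => intro c suffix; simp [pvCarryK, pvOutK]
  | succ k ih =>
      intro c suffix
      have hr : (List.range (k + 1)).reverse = k :: (List.range k).reverse := by
        simp [List.range_succ]
      rw [hr, List.foldl_cons]
      show ((List.range k).reverse).foldl (pvStep al bl) (pvStep al bl (c, _) k) = _
      simp only [pvStep]
      rw [pvSet_replicate]
      rw [ih]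
      simp [pvCarryK, pvOutK]

theorem pvVal_take_succ (l : List Char) (k : Nat) (hk : k < l.length) :
    pvVal (l.take (k + 1)) = pvVal (l.take k) * 2 + (if l.getD k ' ' = '1' then 1 else 0) := by
  have h : l.take (k + 1) = l.take k ++ [l[k]] := by
    rw [List.take_succ]
    simp [List.getElem?_eq_getElem hk]
  simp only [pvVal]
  rw [h, List.foldl_append]
  simp [List.getD, List.getElem?_eq_getElem hk]

theorem pvOutK_char (al bl : List Char) :
    ∀ (k : Nat), k ≤ al.length → k ≤ bl.length → ∀ (c : Nat), c ≤ 1 →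
      pvOutK al bl k c =
        (List.range k).map (fun i =>
          if ((pvVal (al.take k) + pvVal (bl.take k) + c) / 2 ^ (k - 1 - i)) % 2 = 1
          then '1' else '0') := by
  intro k
  induction k with
  | zero => intro _ _ c _; simp [pvOutK]
  | succ k ih =>
      intro hka hkb c hc
      have hka' : k < al.length := hka
      have hkb' : k < bl.length := hkb
      set ab := (if al.getD k ' ' = '1' then 1 else 0 : Nat) with hab
      set bb := (if bl.getD k ' ' = '1' then 1 else 0 : Nat) with hbb
      have hab1 : ab ≤ 1 := by rw [hab]; split <;> omega
      have hbb1 : bb ≤ 1 := by rw [hbb]; split <;> omega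
      set s := ab + bb + c with hs
      have hs3 : s ≤ 3 := by omega
      have hcarry : (if s ≥ 2 then 1 else 0 : Nat) = s / 2 := by split <;> omega
      set T := pvVal (al.take (k + 1)) + pvVal (bl.take (k + 1)) + c with hT
      set Tk := pvVal (al.take k) + pvVal (bl.take k) + s / 2 with hTk
      have hTeq : T = 2 * Tk + s % 2 := by
        rw [hT, hTk, pvVal_take_succ al k hka', pvVal_take_succ bl k hkb', ← hab, ← hbb]
        omega
      have hT2 : T / 2 = Tk := by omega
      have hTm : T % 2 = s % 2 := by omega
      show pvOutK al bl k (if s ≥ 2 then 1 else 0) ++ [if s % 2 = 1 then '1' else '0'] = _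
      rw [hcarry, ih (le_of_lt hka') (le_of_lt hkb') (s / 2) (by omega)]
      rw [List.range_succ, List.map_append]
      congr 1
      · apply List.map_congr_left
        intro i hi
        have hik : i < k := List.mem_range.mp hi
        have hpow : 2 ^ (k + 1 - 1 - i) = 2 ^ (k - 1 - i) * 2 := by
          have : k + 1 - 1 - i = (k - 1 - i) + 1 := by omega
          rw [this, pow_succ]
        have hdiv : T / 2 ^ (k + 1 - 1 - i) = Tk / 2 ^ (k - 1 - i) := by
          rw [hpow, Nat.mul_comm, ← Nat.div_div_eq_div_mul, hT2]
        rw [hdiv, ← hTk]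
      · simp only [List.map_cons, List.map_nil]
        have : k + 1 - 1 - k = 0 := by omega
        rw [this]
        simp [Nat.div_one, hTm]

-- The low-bit peeling loop of B.
def pvLowBits : Nat → Nat → List Char
  | _, 0 => []
  | t, k + 1 => (if t % 2 = 1 then '1' else '0') :: pvLowBits (t / 2) k

theorem pvFoldB : ∀ (l : List Nat) (acc : List Char) (t : Nat),
    l.foldl (fun (st : List Char × Nat) _ =>
        (st.1 ++ [if st.2 % 2 = 1 then '1' else '0'], st.2 / 2)) (acc, t)
      = (acc ++ pvLowBits t l.length, t / 2 ^ l.length) := by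
  intro l
  induction l with
  | nil => intro acc t; simp [pvLowBits]
  | cons x xs ih =>
      intro acc t
      rw [List.foldl_cons]
      show xs.foldl _ (acc ++ [if t % 2 = 1 then '1' else '0'], t / 2) = _
      rw [ih]
      simp only [List.length_cons, pvLowBits, List.append_assoc, List.singleton_append]
      rw [Nat.div_div_eq_div_mul, ← pow_succ']

theorem pvLowBits_map : ∀ (k t : Nat),
    pvLowBits t k = (List.range k).map (fun j => if t / 2 ^ j % 2 = 1 then '1' else '0') := by
  intro k
  induction k with
  | zero => intro t; simp [pvLowBits]
  | succ k ih =>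
      intro t
      rw [List.range_succ_eq_map, List.map_cons, List.map_map]
      show (if t % 2 = 1 then '1' else '0') :: pvLowBits (t / 2) k = _
      rw [ih (t / 2)]
      congr 1
      · simp
      · apply List.map_congr_left
        intro j _
        have h : t / 2 ^ (j + 1) = t / 2 / 2 ^ j := by
          rw [Nat.div_div_eq_div_mul, pow_succ']
        simp [Function.comp, h]

theorem pvRevMap (f : Nat → Char) (n : Nat) :
    ((List.range n).map f).reverse = (List.range n).map (fun i => f (n - 1 - i)) := by
  apply List.ext_getElem
  · simp
  · intro i h1 h2
    simp only [List.getElem_reverse, List.getElem_map, List.getElem_range, List.length_map, List.length_range]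

-- ===== VERDICT (by name: the statement is the Claim_ definition above) =====
theorem add_bits_n_py_spec : Claim_equal_add_bits_n_py := by
  intro a b _ hpre
  unfold Spec_add_bits_n_py add_bits_n_py add_bits_n_py_alt
  have hl : a.toList.length = b.toList.length := hpre
  simp only [hl, ne_eq, not_true_eq_false, if_false]
  have hstep : (fun (st : Nat × List Char) (i : Nat) =>
      ((if ((if a.toList.getD i ' ' = '1' then 1 else 0) +
            (if b.toList.getD i ' ' = '1' then 1 else 0) + st.1) ≥ 2 then (1 : Nat) else 0),
       st.2.set i (if ((if a.toList.getD i ' ' = '1' then 1 else 0) +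
            (if b.toList.getD i ' ' = '1' then 1 else 0) + st.1) % 2 = 1 then '1' else '0')))
      = pvStep a.toList b.toList := rfl
  rw [hstep]
  have hfold := pvFoldA a.toList b.toList b.toList.length 0 []
  rw [List.append_nil] at hfold
  rw [hfold, List.append_nil]
  rw [pvOutK_char a.toList b.toList b.toList.length (by omega) (le_refl _) 0 (by omega)]
  rw [pvFoldB]
  simp only [List.length_range]
  rw [pvLowBits_map, List.nil_append, pvRevMap]
  have hta : List.take b.length a.toList = a.toList := by
    have h : b.length = a.toList.length := by rw [hl]; simp
    rw [h]; exact List.take_length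
  have htb : List.take b.length b.toList = b.toList := by
    have h : b.length = b.toList.length := by simp
    rw [h]; exact List.take_length
  simp [pvVal, hta, htb]
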